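-- pv_equiv track=rewrite | github.com/lemonsis/Oracle_Benchmark | platforms/encryption/easy/idx_shift_encryption_final.py | blackbox
-- ===== SOURCE A (Python) =====
-- def blackbox(plaintext):
--     # Helper: map letter to value
--     def letter_to_value(ch):
--         if 'a' <= ch <= 'z':
--             return ord(ch) - ord('a')
--         elif 'A' <= ch <= 'Z':
--             return ord(ch) - ord('A') + 26
--         else:
--             return None
--
--     # Helper: map value to letter
--     def value_to_letter(val):
--         if 0 <= val <= 25:
--             return chr(val + ord('a'))
--         elif 26 <= val <= 51:
--             return chr(val - 26 + ord('A'))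
--         else:
--             return ''
--
--     ciphertext = ''
--     idx = 0
--     for ch in plaintext:
--         if ch == ' ':
--             ciphertext += ' '
--         elif ('a' <= ch <= 'z') or ('A' <= ch <= 'Z'):
--             val = letter_to_value(ch)
--             shifted_val = (val + idx) % 52
--             ciphertext += value_to_letter(shifted_val)
--             idx += 1
--         else:
--             # Ignore non-letter, non-space characters
--             pass
--     return ciphertext
-- ===== SOURCE B (Python) =====
-- def blackbox(plaintext):
--     # precompute-then-merge: encrypt the letters in one pass, then merge with spaces
--     def letter_to_value(ch):
--         return ord(ch) - ord('a') if ch.islower() else ord(ch) - ord('A') + 26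
--
--     def value_to_letter(val):
--         return chr(val + ord('a')) if val <= 25 else chr(val - 26 + ord('A'))
--
--     letters = [c for c in plaintext if c.isalpha()]
--     enc = [value_to_letter((letter_to_value(c) + i) % 52) for i, c in enumerate(letters)]
--     it = iter(enc)
--     out = []
--     for ch in plaintext:
--         if ch == ' ':
--             out.append(' ')
--         elif ch.isalpha():
--             out.append(next(it))
--     return ''.join(out)
-- ===== Notes on version B (the rewrite author's own statement) =====
-- stated objective: alternative
-- what changed: A's single loop with a mutable shift counter is replaced by a two-pass precompute-then-merge structure: B first filters the letters and encrypts them all via enumerate, then a second pass over the plaintext merges spaces with the precomputed cipher letters from an iterator.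
import Mathlib
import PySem

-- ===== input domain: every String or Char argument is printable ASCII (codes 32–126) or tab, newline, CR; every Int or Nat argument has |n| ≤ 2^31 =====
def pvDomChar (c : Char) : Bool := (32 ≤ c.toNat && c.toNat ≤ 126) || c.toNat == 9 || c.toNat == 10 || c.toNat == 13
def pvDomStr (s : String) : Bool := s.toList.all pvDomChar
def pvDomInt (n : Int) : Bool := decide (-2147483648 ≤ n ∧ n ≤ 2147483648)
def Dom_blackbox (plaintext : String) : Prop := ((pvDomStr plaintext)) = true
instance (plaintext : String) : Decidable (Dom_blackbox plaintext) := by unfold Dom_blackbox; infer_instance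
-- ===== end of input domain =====

-- B replaces A's single stateful counter-in-loop with a two-pass precompute-then-merge
-- decomposition (encrypt the filtered letters first, then merge with spaces); objective: alternative.

-- ===== PORT A =====
-- helper letter_to_value (None → Option)
def pvL2vA (ch : Char) : Option Int :=
  if 'a' ≤ ch ∧ ch ≤ 'z' then some ((ch.toNat : Int) - 97)
  else if 'A' ≤ ch ∧ ch ≤ 'Z' then some ((ch.toNat : Int) - 65 + 26)
  else none

-- helper value_to_letter
def pvV2lA (val : Int) : String :=
  if 0 ≤ val ∧ val ≤ 25 then String.ofList [Char.ofNat (val + 97).toNat]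
  else if 26 ≤ val ∧ val ≤ 51 then String.ofList [Char.ofNat (val - 26 + 65).toNat]
  else ""

-- the for-loop over plaintext with state (ciphertext, idx)
def pvLoopA : List Char → Int → String → String
  | [], _, acc => acc
  | ch :: rest, idx, acc =>
    if ch = ' ' then pvLoopA rest idx (acc ++ " ")
    else if ('a' ≤ ch ∧ ch ≤ 'z') ∨ ('A' ≤ ch ∧ ch ≤ 'Z') then
      match pvL2vA ch with
      | some val => pvLoopA rest (idx + 1) (acc ++ pvV2lA (PySem.Int.mod (val + idx) 52))
      | none => pvLoopA rest (idx + 1) acc  -- unreachable: the guard ensures ch is a letter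
    else pvLoopA rest idx acc

def blackbox (plaintext : String) : String := pvLoopA plaintext.toList 0 ""

-- ===== PORT B =====
-- ch.isalpha() / the letter test; exact for the printable-ASCII domain
def pvIsAl (ch : Char) : Bool := decide ('a' ≤ ch ∧ ch ≤ 'z') || decide ('A' ≤ ch ∧ ch ≤ 'Z')

-- letter_to_value (only called on letters; ch.islower() on ASCII letters is 'a' ≤ ch ≤ 'z')
def pvL2vB (ch : Char) : Int :=
  if 'a' ≤ ch ∧ ch ≤ 'z' then (ch.toNat : Int) - 97 else (ch.toNat : Int) - 65 + 26

-- value_to_letter (only called on values in 0..51)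
def pvV2lB (val : Int) : String :=
  if val ≤ 25 then String.ofList [Char.ofNat (val + 97).toNat]
  else String.ofList [Char.ofNat (val - 26 + 65).toNat]

-- enc = [value_to_letter((letter_to_value(c)+i) % 52) for i, c in enumerate(letters)]
def pvEnc (letters : List Char) : List String :=
  (PySem.List.enumerate letters).map (fun p => pvV2lB (PySem.Int.mod (pvL2vB p.2 + p.1) 52))

-- second pass: for ch in plaintext, append ' ' / next(it); it is the list of remaining enc entries
def pvLoopB : List Char → List String → List String → List String
  | [], _, acc => acc
  | ch :: rest, it, acc =>
    if ch = ' ' then pvLoopB rest it (acc ++ [" "])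
    else if pvIsAl ch then
      match it with
      | e :: it' => pvLoopB rest it' (acc ++ [e])
      | [] => pvLoopB rest [] acc  -- unreachable: enc has one entry per letter
    else pvLoopB rest it acc

def blackbox_alt (plaintext : String) : String :=
  String.join (pvLoopB plaintext.toList (pvEnc (plaintext.toList.filter pvIsAl)) [])

-- ===== PRECONDITION & SPEC =====
def Spec_blackbox (plaintext : String) (out : String) : Prop := out = blackbox_alt plaintext
instance (plaintext : String) (out : String) : Decidable (Spec_blackbox plaintext out) := by unfold Spec_blackbox; infer_instance

-- ===== CLAIM (what is proved, stated in full; the proofs are below) =====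
def Claim_equal_blackbox : Prop := ∀ (plaintext : String), Dom_blackbox plaintext → Spec_blackbox plaintext (blackbox plaintext)

-- ===== LEMMAS AND PROOFS =====

-- the enc entries, written with an arbitrary start index (enumerate's start parameter)
def pvEncFrom (i : Int) (letters : List Char) : List String :=
  (PySem.List.enumerate letters i).map (fun p => pvV2lB (PySem.Int.mod (pvL2vB p.2 + p.1) 52))

lemma pvEnc_eq_from (letters : List Char) : pvEnc letters = pvEncFrom 0 letters := rfl

lemma pvEncFrom_cons (i : Int) (c : Char) (cs : List Char) :
    pvEncFrom i (c :: cs) =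
      pvV2lB (PySem.Int.mod (pvL2vB c + i) 52) :: pvEncFrom (i + 1) cs := rfl

lemma pvJoin_snoc (l : List String) (s : String) :
    String.join (l ++ [s]) = String.join l ++ s := by
  simp [String.join]

-- on the results A's value_to_letter produces (0 ≤ v ≤ 51), the two helpers agree
lemma pvV2l_agree (v : Int) (h0 : 0 ≤ v) (h1 : v < 52) : pvV2lA v = pvV2lB v := by
  unfold pvV2lA pvV2lB
  split_ifs with h2 h3 h4 <;> first | rfl | omega

-- main invariant: A's loop from index idx equals B's merge of the remaining
-- enc entries (computed from start index idx), modulo the accumulators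
lemma pvLoop_agree : ∀ (cs : List Char) (idx : Int) (lacc : List String),
    pvLoopA cs idx (String.join lacc) =
      String.join (pvLoopB cs (pvEncFrom idx (cs.filter pvIsAl)) lacc) := by
  intro cs
  induction cs with
  | nil => intro idx lacc; simp [pvLoopA, pvLoopB]
  | cons ch rest ih =>
    intro idx lacc
    by_cases hsp : ch = ' '
    · have hna : pvIsAl ch = false := by subst hsp; decide
      simp only [pvLoopA, pvLoopB, hsp, List.filter_cons, if_true,
        show pvIsAl ' ' = false from rfl, Bool.false_eq_true, if_false]
      rw [← pvJoin_snoc, ih]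
    · by_cases hlo : 'a' ≤ ch ∧ ch ≤ 'z'
      · have hal : pvIsAl ch = true := by simp [pvIsAl, hlo]
        simp only [pvLoopA, pvLoopB, if_neg hsp, List.filter_cons, hal, if_true,
          pvL2vA, if_pos hlo, pvEncFrom_cons]
        rw [pvV2l_agree _ (PySem.Int.mod_nonneg _ (by omega)) (PySem.Int.mod_lt _ (by omega)),
          pvL2vB, if_pos hlo, ← pvJoin_snoc, ih, if_pos (Or.inl hlo)]
      · by_cases hup : 'A' ≤ ch ∧ ch ≤ 'Z'
        · have hal : pvIsAl ch = true := by simp [pvIsAl, hup]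
          simp only [pvLoopA, pvLoopB, if_neg hsp, List.filter_cons, hal, if_true,
            pvL2vA, if_neg hlo, if_pos hup, pvEncFrom_cons]
          rw [pvV2l_agree _ (PySem.Int.mod_nonneg _ (by omega)) (PySem.Int.mod_lt _ (by omega)),
            pvL2vB, if_neg hlo, ← pvJoin_snoc, ih, if_pos (Or.inr hup)]
        · have hal : pvIsAl ch = false := by simp [pvIsAl, hlo, hup]
          have hno : ¬ (('a' ≤ ch ∧ ch ≤ 'z') ∨ ('A' ≤ ch ∧ ch ≤ 'Z')) := by tauto
          simp only [pvLoopA, pvLoopB, if_neg hsp, if_neg hno, List.filter_cons, hal,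
            if_false, Bool.false_eq_true]
          exact ih idx lacc

-- ===== VERDICT (by name: the statement is the Claim_ definition above) =====
theorem blackbox_spec : Claim_equal_blackbox := by
  intro plaintext _
  show blackbox plaintext = blackbox_alt plaintext
  unfold blackbox blackbox_alt
  rw [pvEnc_eq_from]
  simpa using pvLoop_agree plaintext.toList 0 []
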